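-- pv_equiv track=rewrite | github.com/POOIKL/Project | result_time_online_time_ver2/MyToolBox.py | Remove_duplication
-- ===== SOURCE A (Python) =====
-- def Remove_duplication(TheList):
--     # 返回测试图像去重后的点的索引 query_index
--     temp = [TheList[0]]
--     query_index = [TheList[0][1]]
--     count = 0
--     for i in range(1, len(TheList)):
--         if(TheList[i][0] == temp[count][0] and TheList[i][2] < temp[count][2]):
--             temp[count] = TheList[i]
--             query_index[count] = TheList[i][1]
--
--         elif(TheList[i][0] != temp[count][0]):
--             temp.append(TheList[i])
--             query_index.append(TheList[i][1])
--             count+=1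
--     return query_index
-- ===== SOURCE B (Python) =====
-- def Remove_duplication(TheList):
--     # Stage 1: label each element with a run id (consecutive equal first coordinates).
--     ids = []
--     rid = -1
--     prev = None
--     for x in TheList:
--         if rid < 0 or x[0] != prev:
--             rid += 1
--             prev = x[0]
--         ids.append(rid)
--     # Stage 2: aggregate the minimum-third element per run id in a dict.
--     best = {}
--     for r, x in zip(ids, TheList):
--         if r not in best or x[2] < best[r][2]:
--             best[r] = x
--     # Stage 3: project the kept [1]-values in run order.
--     return [best[r][1] for r in range(rid + 1)]
-- ===== Notes on version B (the rewrite author's own statement) =====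
-- stated objective: alternative
-- what changed: Replaces A's fused single pass with mutable temp/query_index/count state by three staged passes: label elements with run ids, aggregate the minimal-third element per run id into a dict, then project the [1]-values over range(rid+1).
import Mathlib
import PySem

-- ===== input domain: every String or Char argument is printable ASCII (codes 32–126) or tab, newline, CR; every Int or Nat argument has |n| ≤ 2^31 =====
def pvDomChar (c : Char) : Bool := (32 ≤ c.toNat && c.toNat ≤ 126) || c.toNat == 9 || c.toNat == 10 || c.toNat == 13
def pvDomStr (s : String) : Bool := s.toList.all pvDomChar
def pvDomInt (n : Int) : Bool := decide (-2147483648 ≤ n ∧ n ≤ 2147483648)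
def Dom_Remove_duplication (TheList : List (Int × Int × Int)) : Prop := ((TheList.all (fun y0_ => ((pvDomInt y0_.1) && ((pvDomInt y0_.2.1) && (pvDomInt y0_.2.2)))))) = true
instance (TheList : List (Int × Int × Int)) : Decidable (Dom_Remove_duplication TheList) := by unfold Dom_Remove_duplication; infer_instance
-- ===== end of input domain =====

-- B replaces A's fused single pass (mutable temp/query_index/count) by three staged passes:
-- run-id labels, a dict aggregating the minimal-third element per run id, then a projection.
-- Equal return values on non-empty input; on [] A raises IndexError while B returns [].

-- ===== PORT A =====
-- loop over TheList[1:], carrying the full temp and query_index lists and count, as A does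
def pvLoopA (rest : List (Int × Int × Int)) (temp : List (Int × Int × Int))
    (qi : List Int) (count : Nat) : List Int :=
  match rest with
  | [] => qi
  | x :: xs =>
    let t := temp.getD count (0, 0, 0)
    if x.1 == t.1 && decide (x.2.2 < t.2.2) then
      pvLoopA xs (temp.set count x) (qi.set count x.2.1) count
    else if !(x.1 == t.1) then
      pvLoopA xs (temp ++ [x]) (qi ++ [x.2.1]) (count + 1)
    else
      pvLoopA xs temp qi count

def Remove_duplication (TheList : List (Int × Int × Int)) : List Int :=
  match TheList with
  | [] => []  -- A raises IndexError here; excluded by Pre_Remove_duplication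
  | h :: t => pvLoopA t [h] [h.2.1] 0

-- ===== PORT B =====
-- Stage 1: run-id labels (ids list, final rid); prev is the argument, updated only on a new run
def pvIdsLoop (l : List (Int × Int × Int)) (ids : List Int) (rid : Int)
    (prev : Option Int) : List Int × Int :=
  match l with
  | [] => (ids, rid)
  | x :: xs =>
    if rid < 0 || !(some x.1 == prev) then
      pvIdsLoop xs (ids ++ [rid + 1]) (rid + 1) (some x.1)
    else
      pvIdsLoop xs (ids ++ [rid]) rid prev

-- Stage 2: one fold step of the dict aggregation (best[r] lookup is guarded by contains,
-- so the getD default is never the result — exact for the Python)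
def pvStepB (b : PySem.Dict Int (Int × Int × Int)) (p : Int × (Int × Int × Int)) :
    PySem.Dict Int (Int × Int × Int) :=
  if !(b.contains p.1) || decide (p.2.2.2 < (b.getD p.1 (0, 0, 0)).2.2) then
    b.insert p.1 p.2
  else b

def Remove_duplication_alt (TheList : List (Int × Int × Int)) : List Int :=
  let st := pvIdsLoop TheList [] (-1) none
  let best := (st.1.zip TheList).foldl pvStepB PySem.Dict.empty
  -- Stage 3: best contains every r in range(rid+1), so getD is exact (no KeyError reachable)
  (PySem.List.pyRange 0 (st.2 + 1) 1).map (fun r => (best.getD r (0, 0, 0)).2.1)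

-- ===== PRECONDITION & SPEC =====
-- Pre_ excludes exactly the empty list, on which A raises IndexError (B simply returns [] there).
def Pre_Remove_duplication (TheList : List (Int × Int × Int)) : Prop := TheList ≠ []
instance (TheList : List (Int × Int × Int)) : Decidable (Pre_Remove_duplication TheList) := by
  unfold Pre_Remove_duplication; infer_instance
def pvWitness_Remove_duplication : (List (Int × Int × Int)) := [(1, 2, 3), (1, 4, 1), (2, 5, 0)]
def Spec_Remove_duplication (TheList : List (Int × Int × Int)) (out : List Int) : Prop := out = Remove_duplication_alt TheList
instance (TheList : List (Int × Int × Int)) (out : List Int) : Decidable (Spec_Remove_duplication TheList out) := by unfold Spec_Remove_duplication; infer_instance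

-- ===== CLAIM (what is proved, stated in full; the proofs are below) =====
def Claim_equal_Remove_duplication : Prop := ∀ (TheList : List (Int × Int × Int)), Dom_Remove_duplication TheList → Pre_Remove_duplication TheList → Spec_Remove_duplication TheList (Remove_duplication TheList)

-- ===== LEMMAS AND PROOFS =====

-- common reference function: process the rest of the list with a current best element
def pvRef (cur : Int × Int × Int) (rest : List (Int × Int × Int)) : List Int :=
  match rest with
  | [] => [cur.2.1]
  | x :: xs =>
    if x.1 == cur.1 then
      if decide (x.2.2 < cur.2.2) then pvRef x xs else pvRef cur xs
    else
      cur.2.1 :: pvRef x xs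

theorem pv_getD_snoc {α : Type} (pre : List α) (c d : α) :
    (pre ++ [c]).getD pre.length d = c := by
  induction pre with
  | nil => rfl
  | cons a t ih => simp

theorem pv_set_snoc {α : Type} (pre : List α) (c x : α) :
    (pre ++ [c]).set pre.length x = pre ++ [x] := by
  induction pre with
  | nil => rfl
  | cons a t ih => simp [ih]

-- A's loop computes a processed prefix followed by the reference function
theorem pvLoopA_eq_ref (rest : List (Int × Int × Int)) :
    ∀ (pre : List (Int × Int × Int)) (preIdx : List Int) (cur : Int × Int × Int),
      preIdx.length = pre.length →
      pvLoopA rest (pre ++ [cur]) (preIdx ++ [cur.2.1]) pre.length =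
        preIdx ++ pvRef cur rest := by
  induction rest with
  | nil => intro pre preIdx cur h; simp [pvLoopA, pvRef]
  | cons x xs ih =>
    intro pre preIdx cur h
    simp only [pvLoopA, pv_getD_snoc, pvRef]
    by_cases h1 : x.1 == cur.1
    · by_cases h2 : x.2.2 < cur.2.2
      · simp only [h1, h2, decide_true, Bool.and_self, if_true]
        have hs := pv_set_snoc preIdx cur.2.1 x.2.1
        rw [h] at hs
        rw [pv_set_snoc, hs, ih pre preIdx x h]
      · simp only [h1, h2, decide_false, Bool.and_false, Bool.false_eq_true, if_false,
          Bool.not_true, Bool.false_eq_true, if_false]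
        rw [ih pre preIdx cur h]
        simp
    · simp only [Bool.eq_false_iff.mpr h1, Bool.false_and, Bool.false_eq_true, if_false,
        Bool.not_false, if_true]
      have h' : (preIdx ++ [cur.2.1]).length = (pre ++ [cur]).length := by
        simp [h]
      have hthis := ih (pre ++ [cur]) (preIdx ++ [cur.2.1]) x h'
      have hlen : (pre ++ [cur]).length = pre.length + 1 := by simp
      rw [hlen] at hthis
      rw [hthis]
      simp


-- ---- B-side machinery: the dict built by stage 2 is the enumeration of the bests list ----

def pvEnumFrom (n : Int) : List (Int × Int × Int) → List (Int × (Int × Int × Int))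
  | [] => []
  | x :: xs => (n, x) :: pvEnumFrom (n + 1) xs

theorem pv_enum_snoc (l : List (Int × Int × Int)) :
    ∀ (n : Int) (c : Int × Int × Int),
      pvEnumFrom n (l ++ [c]) = pvEnumFrom n l ++ [(n + l.length, c)] := by
  induction l with
  | nil => intro n c; simp [pvEnumFrom]
  | cons a t ih =>
    intro n c
    have hc : n + 1 + (t.length : Int) = n + ((t.length + 1 : Nat) : Int) := by push_cast; ring
    simp only [List.cons_append, pvEnumFrom, ih, List.length_cons, hc]

theorem pv_get?_enum (l : List (Int × Int × Int)) :
    ∀ (n : Int) (j : Nat) (hj : j < l.length),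
      (PySem.Dict.mk (pvEnumFrom n l)).get? (n + j) = some l[j] := by
  induction l with
  | nil => intro n j hj; simp at hj
  | cons a t ih =>
    intro n j hj
    rw [pvEnumFrom, PySem.Dict.get?_mk_cons]
    match j with
    | 0 => simp
    | j' + 1 =>
      have hne : (n == n + ((j' + 1 : Nat) : Int)) = false := by
        rw [beq_eq_false_iff_ne]
        push_cast
        omega
      rw [hne]
      simp only [Bool.false_eq_true, if_false]
      have h2 : n + ((j' + 1 : Nat) : Int) = (n + 1) + (j' : Int) := by push_cast; ring
      rw [h2, ih (n + 1) j' (by simpa using hj)]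
      simp

theorem pv_contains_enum_ge (l : List (Int × Int × Int)) :
    ∀ (n m : Int), n + l.length ≤ m →
      (PySem.Dict.mk (pvEnumFrom n l)).contains m = false := by
  induction l with
  | nil => intro n m _; rfl
  | cons a t ih =>
    intro n m hm
    show (pvEnumFrom n (a :: t)).any (fun p => p.1 == m) = false
    simp only [pvEnumFrom, List.any_cons, Bool.or_eq_false_iff]
    have hal : n + ((a :: t).length : Int) ≤ m := hm
    simp only [List.length_cons] at hal
    refine ⟨?_, ih (n + 1) m (by push_cast at hal ⊢; omega)⟩
    rw [beq_eq_false_iff_ne]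
    push_cast at hal
    omega

theorem pv_map_replace (l : List (Int × Int × Int)) (v : Int × Int × Int) :
    ∀ (n m : Int), n + l.length ≤ m →
      (pvEnumFrom n l).map (fun p => if p.1 == m then (m, v) else p) = pvEnumFrom n l := by
  induction l with
  | nil => intro n m _; rfl
  | cons a t ih =>
    intro n m hm
    simp only [List.length_cons] at hm
    push_cast at hm
    simp only [pvEnumFrom, List.map_cons]
    have hne : (n == m) = false := by rw [beq_eq_false_iff_ne]; omega
    rw [hne]
    simp only [Bool.false_eq_true, if_false]
    rw [ih (n + 1) m (by omega)]

theorem pv_contains_enum_last (pre : List (Int × Int × Int)) (cur : Int × Int × Int) :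
    (PySem.Dict.mk (pvEnumFrom 0 (pre ++ [cur]))).contains (pre.length : Int) = true := by
  rw [PySem.Dict.contains_eq_isSome_get?]
  have h := pv_get?_enum (pre ++ [cur]) 0 pre.length (by simp)
  rw [zero_add] at h
  rw [h]
  rfl

theorem pv_getD_enum_last (pre : List (Int × Int × Int)) (cur : Int × Int × Int) :
    (PySem.Dict.mk (pvEnumFrom 0 (pre ++ [cur]))).getD (pre.length : Int) (0, 0, 0) = cur := by
  rw [PySem.Dict.getD_eq_get?_getD]
  have h := pv_get?_enum (pre ++ [cur]) 0 pre.length (by simp)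
  rw [zero_add] at h
  rw [h]
  simp

theorem pv_insert_last (pre : List (Int × Int × Int)) (cur x : Int × Int × Int) :
    (PySem.Dict.mk (pvEnumFrom 0 (pre ++ [cur]))).insert (pre.length : Int) x =
      PySem.Dict.mk (pvEnumFrom 0 (pre ++ [x])) := by
  apply PySem.Dict.ext
  rw [PySem.Dict.items_insert]
  rw [pv_contains_enum_last pre cur]
  show (pvEnumFrom 0 (pre ++ [cur])).map _ = pvEnumFrom 0 (pre ++ [x])
  rw [pv_enum_snoc, pv_enum_snoc, List.map_append,
    pv_map_replace pre x 0 (pre.length : Int) (by simp)]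
  simp

theorem pv_insert_fresh (l : List (Int × Int × Int)) (x : Int × Int × Int) :
    (PySem.Dict.mk (pvEnumFrom 0 l)).insert (l.length : Int) x =
      PySem.Dict.mk (pvEnumFrom 0 (l ++ [x])) := by
  apply PySem.Dict.ext
  rw [PySem.Dict.items_insert]
  rw [pv_contains_enum_ge l 0 (l.length : Int) (by simp)]
  rw [pv_enum_snoc]
  simp

theorem pv_proj (l : List (Int × Int × Int)) :
    (PySem.List.pyRange 0 (l.length : Int) 1).map
      (fun r => ((PySem.Dict.mk (pvEnumFrom 0 l)).getD r (0, 0, 0)).2.1) =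
      l.map (fun p => p.2.1) := by
  rw [PySem.List.pyRange_zero_natCast]
  rw [List.map_map]
  apply List.ext_getElem (by simp)
  intro i h1 h2
  simp only [List.getElem_map, List.getElem_range, Function.comp_apply]
  have hi : i < l.length := by simpa using h2
  have h := pv_get?_enum l 0 i hi
  rw [zero_add] at h
  rw [PySem.Dict.getD_eq_get?_getD, h]
  simp

theorem pvIdsLoop_acc (l : List (Int × Int × Int)) :
    ∀ (acc : List Int) (rid : Int) (prev : Option Int),
      pvIdsLoop l acc rid prev =
        (acc ++ (pvIdsLoop l [] rid prev).1, (pvIdsLoop l [] rid prev).2) := by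
  induction l with
  | nil => intro acc rid prev; simp [pvIdsLoop]
  | cons x xs ih =>
    intro acc rid prev
    simp only [pvIdsLoop, List.nil_append]
    by_cases hc : (decide (rid < 0) || !(some x.1 == prev)) = true
    · simp only [hc, if_true]
      rw [ih (acc ++ [rid + 1]), ih [rid + 1]]
      simp
    · rw [Bool.not_eq_true] at hc
      simp only [hc, Bool.false_eq_true, if_false]
      rw [ih (acc ++ [rid]), ih [rid]]
      simp

-- stage 1 + stage 2 + stage 3, from mid-run state, compute the reference function
theorem pvB_main (rest : List (Int × Int × Int)) :
    ∀ (pre : List (Int × Int × Int)) (cur : Int × Int × Int),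
      (PySem.List.pyRange 0 ((pvIdsLoop rest [] (pre.length : Int) (some cur.1)).2 + 1) 1).map
        (fun r =>
          ((((pvIdsLoop rest [] (pre.length : Int) (some cur.1)).1.zip rest).foldl pvStepB
              (PySem.Dict.mk (pvEnumFrom 0 (pre ++ [cur])))).getD r (0, 0, 0)).2.1) =
        pre.map (fun p => p.2.1) ++ pvRef cur rest := by
  induction rest with
  | nil =>
    intro pre cur
    simp only [pvIdsLoop, List.zip_nil_right, List.foldl_nil, pvRef]
    have h : ((pre.length : Int) + 1) = ((pre ++ [cur]).length : Int) := by simp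
    rw [h, pv_proj]
    simp
  | cons x xs ih =>
    intro pre cur
    by_cases h1 : x.1 == cur.1
    · -- same run: id = pre.length, dict entry pre.length possibly overwritten
      have hx : (some x.1 == some cur.1) = true := by simpa using h1
      have hcond : (decide ((pre.length : Int) < 0) || !(some x.1 == some cur.1)) = false := by
        rw [hx]
        simp
      have heq1 : x.1 = cur.1 := eq_of_beq h1
      set cur' := if decide (x.2.2 < cur.2.2) then x else cur with hcur'
      have hcur1 : cur'.1 = cur.1 := by rw [hcur']; split <;> simp [heq1]
      rw [pvIdsLoop, if_neg (by simp only [hcond]; decide)]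
      simp only [List.nil_append]
      rw [pvIdsLoop_acc xs [(pre.length : Int)]]
      simp only [List.singleton_append, List.zip_cons_cons, List.foldl_cons]
      have hstep : pvStepB (PySem.Dict.mk (pvEnumFrom 0 (pre ++ [cur])))
          ((pre.length : Int), x) = PySem.Dict.mk (pvEnumFrom 0 (pre ++ [cur'])) := by
        unfold pvStepB
        simp only [pv_contains_enum_last, Bool.not_true, Bool.false_or, pv_getD_enum_last]
        rw [hcur']
        split
        · exact pv_insert_last pre cur x
        · rfl
      rw [hstep]
      have hp : some cur.1 = some cur'.1 := by rw [hcur1]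
      rw [hp, ih pre cur']
      simp only [pvRef, h1, if_true]
      rw [hcur']
      split <;> rfl
    · -- new run: id = pre.length + 1, fresh key appended
      have hx : (some x.1 == some cur.1) = false := by simpa using h1
      have hcond : (decide ((pre.length : Int) < 0) || !(some x.1 == some cur.1)) = true := by
        rw [hx]
        simp
      rw [pvIdsLoop, if_pos hcond]
      simp only [List.nil_append]
      rw [pvIdsLoop_acc xs [(pre.length : Int) + 1]]
      simp only [List.singleton_append, List.zip_cons_cons, List.foldl_cons]
      have hlen : (pre.length : Int) + 1 = (((pre ++ [cur]).length : Nat) : Int) := by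
        simp
      have hstep : pvStepB (PySem.Dict.mk (pvEnumFrom 0 (pre ++ [cur])))
          ((pre.length : Int) + 1, x) =
          PySem.Dict.mk (pvEnumFrom 0 ((pre ++ [cur]) ++ [x])) := by
        unfold pvStepB
        simp only
        rw [show ((pre.length : Int) + 1) = (0 : Int) + ((pre ++ [cur]).length : Int) by
          simp]
        rw [pv_contains_enum_ge (pre ++ [cur]) 0 _ (by simp)]
        simp only [Bool.not_false, Bool.true_or, if_true]
        rw [show ((0 : Int) + ((pre ++ [cur]).length : Int)) = (((pre ++ [cur]).length : Nat) : Int) by simp]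
        exact pv_insert_fresh (pre ++ [cur]) x
      rw [hstep, hlen, ih (pre ++ [cur]) x]
      simp only [List.map_append, List.map_cons, List.map_nil, pvRef, h1]
      simp

theorem pvB_top (h : Int × Int × Int) (t : List (Int × Int × Int)) :
    Remove_duplication_alt (h :: t) = pvRef h t := by
  simp only [Remove_duplication_alt]
  rw [pvIdsLoop, if_pos (by simp)]
  simp only [List.nil_append]
  rw [pvIdsLoop_acc t [(-1 : Int) + 1]]
  simp only [List.singleton_append, List.zip_cons_cons, List.foldl_cons]
  have hm1 : (-1 : Int) + 1 = ((List.length ([] : List (Int × Int × Int)) : Nat) : Int) := by simp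
  rw [hm1]
  have hstep : pvStepB PySem.Dict.empty
      (((List.length ([] : List (Int × Int × Int)) : Nat) : Int), h) =
      PySem.Dict.mk (pvEnumFrom 0 ([] ++ [h])) := by
    unfold pvStepB
    simp only
    rfl
  rw [hstep]
  have := pvB_main t [] h
  simp only [List.length_nil, Nat.cast_zero, List.map_nil, List.nil_append] at this ⊢
  rw [this]

-- ===== VERDICT (by name: the statement is the Claim_ definition above) =====
theorem Remove_duplication_spec : Claim_equal_Remove_duplication := by
  intro TheList _ hpre
  unfold Spec_Remove_duplication
  match TheList with
  | [] => exact absurd rfl hpre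
  | h :: t =>
    show pvLoopA t [h] [h.2.1] 0 = Remove_duplication_alt (h :: t)
    have hA := pvLoopA_eq_ref t [] [] h rfl
    simp only [List.nil_append, List.length_nil] at hA
    rw [hA, pvB_top]
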